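-- pv_equiv track=rewrite | github.com/Nyumiro/exam_preparation | tasks(5).py | list3_to2
-- ===== SOURCE A (Python) =====
-- def list3_to2(one, two, three):
--     queue = []
--     for i in range(len(one)):
--         queue.append(one[i])
--         queue.append(two[i])
--         queue.append(three[i])
--
--     list_one = []
--     list_two = []
--
--     while len(queue) > 0:
--         list_one.append(queue.pop(0))
--         if len(queue) > 0:
--             list_two.append(queue.pop(0))
--     return list_one, list_two
-- ===== SOURCE B (Python) =====
-- def list3_to2(one, two, three):
--     list_one = []
--     list_two = []
--     to_first = True
--     for i in range(len(one)):
--         for x in (one[i], two[i], three[i]):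
--             if to_first:
--                 list_one.append(x)
--             else:
--                 list_two.append(x)
--             to_first = not to_first
--     return list_one, list_two
-- ===== Notes on version B (the rewrite author's own statement) =====
-- stated objective: faster
-- what changed: B fuses A's two phases (build an interleaved queue, then split it by repeated pop(0)) into a single pass that routes each element directly to list_one or list_two with a boolean toggle, never materialising the queue.
import Mathlib
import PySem

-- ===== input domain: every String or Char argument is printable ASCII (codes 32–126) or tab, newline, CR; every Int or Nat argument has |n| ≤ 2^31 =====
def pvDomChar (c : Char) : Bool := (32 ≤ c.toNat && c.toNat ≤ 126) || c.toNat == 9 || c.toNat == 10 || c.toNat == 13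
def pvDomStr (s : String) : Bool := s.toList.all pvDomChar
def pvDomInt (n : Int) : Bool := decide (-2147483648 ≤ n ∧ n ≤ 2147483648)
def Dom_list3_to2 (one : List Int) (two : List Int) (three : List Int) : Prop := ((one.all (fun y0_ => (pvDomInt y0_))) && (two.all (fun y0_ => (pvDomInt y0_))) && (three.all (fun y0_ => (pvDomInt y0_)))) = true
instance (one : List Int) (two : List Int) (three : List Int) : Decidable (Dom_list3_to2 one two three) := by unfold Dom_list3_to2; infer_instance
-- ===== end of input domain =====

-- B fuses A's two phases (build an interleaved queue, then split it by repeated pop(0))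
-- into a single pass with a boolean toggle; equal return value on Pre_ (simpler, no queue).

-- ===== PORT A =====
-- queue.append(one[i]); queue.append(two[i]); queue.append(three[i])
-- (pyGetD with default 0: Pre_list3_to2 guarantees every index is in range, so the default is never used)
def buildStep (one two three : List Int) (q : List Int) (i : Int) : List Int :=
  ((q ++ [PySem.List.pyGetD one i 0]) ++ [PySem.List.pyGetD two i 0]) ++ [PySem.List.pyGetD three i 0]

-- the while loop: pop(0) into list_one, then (if non-empty) pop(0) into list_two
def splitLoop : List Int → List Int → List Int → List Int × List Int
  | [], l1, l2 => (l1, l2)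
  | [a], l1, l2 => (l1 ++ [a], l2)
  | a :: b :: rest, l1, l2 => splitLoop rest (l1 ++ [a]) (l2 ++ [b])

def list3_to2 (one : List Int) (two : List Int) (three : List Int) : List Int × List Int :=
  let queue := (PySem.List.pyRange 0 one.length 1).foldl (buildStep one two three) []
  splitLoop queue [] []

-- ===== PORT B =====
-- append x to list_one or list_two according to the toggle, then flip the toggle
def pushTog (st : List Int × List Int × Bool) (x : Int) : List Int × List Int × Bool :=
  if st.2.2 then (st.1 ++ [x], st.2.1, false) else (st.1, st.2.1 ++ [x], true)

def altStep (one two three : List Int) (st : List Int × List Int × Bool) (i : Int) :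
    List Int × List Int × Bool :=
  pushTog (pushTog (pushTog st (PySem.List.pyGetD one i 0)) (PySem.List.pyGetD two i 0))
    (PySem.List.pyGetD three i 0)

def list3_to2_alt (one : List Int) (two : List Int) (three : List Int) : List Int × List Int :=
  let s := (PySem.List.pyRange 0 one.length 1).foldl (altStep one two three) ([], [], true)
  (s.1, s.2.1)

-- ===== PRECONDITION & SPEC =====
-- Pre_ excludes exactly the inputs where the Python A (and B) raise IndexError:
-- two[i] / three[i] with i < len(one) requires len(one) ≤ len(two) and len(one) ≤ len(three).
def Pre_list3_to2 (one : List Int) (two : List Int) (three : List Int) : Prop :=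
  one.length ≤ two.length ∧ one.length ≤ three.length
instance (one : List Int) (two : List Int) (three : List Int) : Decidable (Pre_list3_to2 one two three) := by unfold Pre_list3_to2; infer_instance

def pvWitness_list3_to2 : List Int × List Int × List Int := ([1, 2], [3, 4], [5, 6, 7])

def Spec_list3_to2 (one : List Int) (two : List Int) (three : List Int) (out : List Int × List Int) : Prop := out = list3_to2_alt one two three
instance (one : List Int) (two : List Int) (three : List Int) (out : List Int × List Int) : Decidable (Spec_list3_to2 one two three out) := by unfold Spec_list3_to2; infer_instance

-- ===== CLAIM (what is proved, stated in full; the proofs are below) =====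
def Claim_equal_list3_to2 : Prop := ∀ (one : List Int) (two : List Int) (three : List Int), Dom_list3_to2 one two three → Pre_list3_to2 one two three → Spec_list3_to2 one two three (list3_to2 one two three)

-- ===== LEMMAS AND PROOFS =====

-- alternating split of a list, parameterised by the current toggle
def splitT : Bool → List Int → List Int × List Int
  | _, [] => ([], [])
  | true, a :: rest => ((splitT false rest).1.cons a, (splitT false rest).2)
  | false, a :: rest => ((splitT true rest).1, (splitT true rest).2.cons a)

theorem splitLoop_eq_splitT (qs l1 l2 : List Int) :
    splitLoop qs l1 l2 = (l1 ++ (splitT true qs).1, l2 ++ (splitT true qs).2) := by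
  fun_induction splitLoop qs l1 l2 with
  | case1 l1 l2 => simp [splitT]
  | case2 a l1 l2 => simp [splitT]
  | case3 a b rest l1 l2 ih => simp [splitT, ih]

theorem foldl_pushTog_eq_splitT (qs l1 l2 : List Int) (t : Bool) :
    qs.foldl pushTog (l1, l2, t) =
      (l1 ++ (splitT t qs).1, l2 ++ (splitT t qs).2,
        if qs.length % 2 = 0 then t else !t) := by
  induction qs generalizing l1 l2 t with
  | nil => simp [splitT]
  | cons x qs ih =>
    cases t with
    | true =>
      simp only [List.foldl_cons, pushTog]
      rw [ih]
      simp [splitT, List.length_cons]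
      by_cases h : qs.length % 2 = 0 <;> simp [h] <;> omega
    | false =>
      simp only [List.foldl_cons, pushTog]
      rw [if_neg (by simp), ih]
      simp [splitT, List.length_cons]
      by_cases h : qs.length % 2 = 0 <;> simp [h] <;> omega

-- pushing the queue built by buildStep element-by-element = running altStep over the range
theorem foldl_build_push (one two three : List Int) (r : List Int)
    (st : List Int × List Int × Bool) (q : List Int) :
    (r.foldl (buildStep one two three) q).foldl pushTog st =
      r.foldl (altStep one two three) (q.foldl pushTog st) := by
  induction r generalizing q st with
  | nil => rfl
  | cons i r ih =>
    simp only [List.foldl_cons]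
    rw [ih]
    congr 1
    simp [buildStep, altStep, List.foldl_append]

-- ===== VERDICT (by name: the statement is the Claim_ definition above) =====
theorem list3_to2_spec : Claim_equal_list3_to2 := by
  intro one two three _ _
  show list3_to2 one two three = list3_to2_alt one two three
  unfold list3_to2 list3_to2_alt
  rw [splitLoop_eq_splitT]
  have h := (foldl_build_push one two three (PySem.List.pyRange 0 one.length 1) ([], [], true) []).symm
  simp only [List.foldl_nil] at h
  rw [foldl_pushTog_eq_splitT] at h
  simp [h]
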